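-- pv_equiv track=rewrite | github.com/moxiaomomo/cmnlib | ani2d/ani2d_tool.py | _shelf_pack_sizes
-- ===== SOURCE A (Python) =====
-- from typing import Any, Dict, List, Optional, Tuple
--
-- def _shelf_pack_sizes(
--     sizes: List[Tuple[int, int]],
--     atlas_width: int,
--     padding: int,
-- ) -> Optional[Tuple[List[Tuple[int, int]], int]]:
--     x = 0
--     y = 0
--     row_height = 0
--     positions: List[Tuple[int, int]] = []
--
--     for w, h in sizes:
--         packed_w = w + padding * 2
--         packed_h = h + padding * 2
--
--         if packed_w > atlas_width:
--             return None
--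
--         if x + packed_w > atlas_width:
--             y += row_height
--             x = 0
--             row_height = 0
--
--         positions.append((x + padding, y + padding))
--         x += packed_w
--         if packed_h > row_height:
--             row_height = packed_h
--
--     total_height = y + row_height
--     return positions, total_height
-- ===== SOURCE B (Python) =====
-- from typing import List, Optional, Tuple
--
-- def _shelf_pack_sizes(
--     sizes: List[Tuple[int, int]],
--     atlas_width: int,
--     padding: int,
-- ) -> Optional[Tuple[List[Tuple[int, int]], int]]:
--     # Pass 1: group items into shelves (a shelf = list of packed widths + its height).
--     shelves: List[Tuple[List[int], int]] = []
--     cur: List[int] = []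
--     cur_w = 0
--     cur_h = 0
--     for w, h in sizes:
--         pw = w + 2 * padding
--         ph = h + 2 * padding
--         if pw > atlas_width:
--             return None
--         if cur_w + pw > atlas_width:
--             shelves.append((cur, cur_h))
--             cur, cur_w, cur_h = [], 0, 0
--         cur.append(pw)
--         cur_w += pw
--         cur_h = max(cur_h, ph)
--     if cur:
--         shelves.append((cur, cur_h))
--     # Pass 2: lay the shelves out top to bottom.
--     positions: List[Tuple[int, int]] = []
--     y = 0
--     for row, sh in shelves:
--         x = 0
--         for pw in row:
--             positions.append((x + padding, y + padding))
--             x += pw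
--         y += sh
--     return positions, y
-- ===== Notes on version B (the rewrite author's own statement) =====
-- stated objective: alternative
-- what changed: Replaced A's single stateful placement loop (x/y/row_height mutated in flight) by a two-phase decomposition: first group the sizes into shelves (packed widths + shelf height), then a second pass lays the shelves out and computes the total height as the running y over shelves.
import Mathlib
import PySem

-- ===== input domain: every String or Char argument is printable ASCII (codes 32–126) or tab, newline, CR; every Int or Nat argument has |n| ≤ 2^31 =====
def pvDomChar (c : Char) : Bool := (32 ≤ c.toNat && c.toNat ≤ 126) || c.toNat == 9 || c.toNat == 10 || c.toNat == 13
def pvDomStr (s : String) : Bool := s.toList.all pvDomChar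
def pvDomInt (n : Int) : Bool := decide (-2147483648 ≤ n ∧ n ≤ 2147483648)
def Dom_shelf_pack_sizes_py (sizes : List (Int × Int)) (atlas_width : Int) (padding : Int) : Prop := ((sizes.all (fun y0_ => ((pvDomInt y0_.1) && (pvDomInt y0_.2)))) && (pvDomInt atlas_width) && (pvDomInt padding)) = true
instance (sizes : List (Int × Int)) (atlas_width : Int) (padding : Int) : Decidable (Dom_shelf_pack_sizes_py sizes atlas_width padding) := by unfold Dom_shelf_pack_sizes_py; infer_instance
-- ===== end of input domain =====

-- B replaces A's single stateful placement loop by a two-phase decomposition (group into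
-- shelves, then lay the shelves out); same cost, alternative structure. Return values only.

-- ===== PORT A =====
-- literal port of A's loop: state (x, y, row_height, positions)
def shelfPackGoA (W p : Int) : List (Int × Int) → Int → Int → Int → List (Int × Int) →
    Option ((List (Int × Int)) × Int)
  | [], _x, y, rh, pos => some (pos, y + rh)
  | (w, h) :: rest, x, y, rh, pos =>
    let pw := w + p * 2
    let ph := h + p * 2
    if pw > W then none
    else
      if x + pw > W then
        -- y += row_height; x = 0; row_height = 0; then append and update
        shelfPackGoA W p rest (0 + pw) (y + rh) (if ph > 0 then ph else 0)
          (pos ++ [(0 + p, y + rh + p)])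
      else
        shelfPackGoA W p rest (x + pw) y (if ph > rh then ph else rh)
          (pos ++ [(x + p, y + p)])

def shelf_pack_sizes_py (sizes : List (Int × Int)) (atlas_width : Int) (padding : Int) :
    Option ((List (Int × Int)) × Int) :=
  shelfPackGoA atlas_width padding sizes 0 0 0 []

-- ===== PORT B =====
-- pass 1: group into shelves; a shelf is (list of packed widths, shelf height)
def shelfGroup (W p : Int) : List (Int × Int) → List Int → Int → Int → List (List Int × Int) →
    Option (List (List Int × Int))
  | [], cur, _cw, ch, shelves =>
    some (if cur.isEmpty then shelves else shelves ++ [(cur, ch)])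
  | (w, h) :: rest, cur, cw, ch, shelves =>
    let pw := w + 2 * p
    let ph := h + 2 * p
    if pw > W then none
    else
      if cw + pw > W then
        shelfGroup W p rest ([] ++ [pw]) (0 + pw) (max 0 ph) (shelves ++ [(cur, ch)])
      else
        shelfGroup W p rest (cur ++ [pw]) (cw + pw) (max ch ph) shelves

-- pass 2 inner loop: place one shelf's items left to right
def shelfRow (p : Int) : List Int → Int → Int → List (Int × Int)
  | [], _x, _y => []
  | pw :: rest, x, y => (x + p, y + p) :: shelfRow p rest (x + pw) y

-- pass 2 outer loop: lay shelves out top to bottom, returning (positions, final y)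
def shelfPlace (p : Int) : List (List Int × Int) → Int → (List (Int × Int)) × Int
  | [], y => ([], y)
  | (row, sh) :: rest, y =>
    let here := shelfRow p row 0 y
    let (ps, ty) := shelfPlace p rest (y + sh)
    (here ++ ps, ty)

def shelf_pack_sizes_py_alt (sizes : List (Int × Int)) (atlas_width : Int) (padding : Int) :
    Option ((List (Int × Int)) × Int) :=
  match shelfGroup atlas_width padding sizes [] 0 0 [] with
  | none => none
  | some shelves => some (shelfPlace padding shelves 0)

-- ===== PRECONDITION & SPEC =====
def Spec_shelf_pack_sizes_py (sizes : List (Int × Int)) (atlas_width : Int) (padding : Int) (out : Option ((List (Int × Int)) × Int)) : Prop := out = shelf_pack_sizes_py_alt sizes atlas_width padding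
instance (sizes : List (Int × Int)) (atlas_width : Int) (padding : Int) (out : Option ((List (Int × Int)) × Int)) : Decidable (Spec_shelf_pack_sizes_py sizes atlas_width padding out) := by unfold Spec_shelf_pack_sizes_py; infer_instance

-- ===== CLAIM (what is proved, stated in full; the proofs are below) =====
def Claim_equal_shelf_pack_sizes_py : Prop := ∀ (sizes : List (Int × Int)) (atlas_width : Int) (padding : Int), Dom_shelf_pack_sizes_py sizes atlas_width padding → Spec_shelf_pack_sizes_py sizes atlas_width padding (shelf_pack_sizes_py sizes atlas_width padding)

-- ===== LEMMAS AND PROOFS =====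

-- sum of a list of Ints (proof-side helper)
def sumL : List Int → Int
  | [] => 0
  | a :: t => a + sumL t

lemma sumL_append (l1 l2 : List Int) : sumL (l1 ++ l2) = sumL l1 + sumL l2 := by
  induction l1 with
  | nil => simp [sumL]
  | cons a t ih => simp [sumL, ih]; ring

lemma shelfRow_append (p : Int) (l1 l2 : List Int) (x y : Int) :
    shelfRow p (l1 ++ l2) x y = shelfRow p l1 x y ++ shelfRow p l2 (x + sumL l1) y := by
  induction l1 generalizing x with
  | nil => simp [shelfRow, sumL]
  | cons a t ih => simp [shelfRow, sumL, ih]; ring_nf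

lemma shelfPlace_append (p : Int) (s : List (List Int × Int)) (row : List Int) (ch y : Int) :
    shelfPlace p (s ++ [(row, ch)]) y =
      ((shelfPlace p s y).1 ++ shelfRow p row 0 (shelfPlace p s y).2,
       (shelfPlace p s y).2 + ch) := by
  induction s generalizing y with
  | nil => simp [shelfPlace]
  | cons a t ih =>
    obtain ⟨r, sh⟩ := a
    simp [shelfPlace, ih]

-- main invariant: A's running state mirrors B's grouping state
lemma shelf_loop_eq (W p : Int) (sizes : List (Int × Int)) :
    ∀ (cur : List Int) (ch : Int) (shelves : List (List Int × Int)),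
      (cur = [] → ch = 0) →
      shelfPackGoA W p sizes (sumL cur) (shelfPlace p shelves 0).2 ch
          ((shelfPlace p shelves 0).1 ++ shelfRow p cur 0 (shelfPlace p shelves 0).2) =
        (shelfGroup W p sizes cur (sumL cur) ch shelves).map (fun sh => shelfPlace p sh 0) := by
  induction sizes with
  | nil =>
    intro cur ch shelves hcur
    cases cur with
    | nil =>
      simp [shelfPackGoA, shelfGroup, shelfRow, hcur rfl]
    | cons a t =>
      simp [shelfPackGoA, shelfGroup, shelfPlace_append]
  | cons sz rest ih =>
    intro cur ch shelves hcur
    obtain ⟨w, h⟩ := sz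
    simp only [shelfPackGoA, shelfGroup]
    have h2 : w + p * 2 = w + 2 * p := by ring
    have h3 : h + p * 2 = h + 2 * p := by ring
    rw [h2, h3]
    by_cases h1 : w + 2 * p > W
    · simp [h1]
    · simp only [h1, if_false]
      by_cases hfit : sumL cur + (w + 2 * p) > W
      · simp only [hfit, if_true]
        have := ih ([] ++ [w + 2 * p]) (max 0 (h + 2 * p)) (shelves ++ [(cur, ch)])
          (by simp)
        rw [shelfPlace_append] at this
        simp only [List.nil_append] at this ⊢
        have hs : sumL [w + 2 * p] = 0 + (w + 2 * p) := by simp [sumL]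
        rw [← hs]
        rw [← this]
        have hmax : (if h + 2 * p > 0 then h + 2 * p else 0) = max 0 (h + 2 * p) := by
          rcases le_or_gt (h + 2 * p) 0 with hle | hgt
          · simp [max_eq_left hle, not_lt.mpr hle]
          · simp [max_eq_right (le_of_lt hgt), hgt]
        rw [hmax]
        congr 1
      · simp only [hfit, if_false]
        have := ih (cur ++ [w + 2 * p]) (max ch (h + 2 * p)) shelves
          (by intro hc; simp at hc)
        rw [sumL_append] at this
        have hs1 : sumL [w + 2 * p] = w + 2 * p := by simp [sumL]
        rw [hs1] at this
        rw [← this]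
        have hmax : (if h + 2 * p > ch then h + 2 * p else ch) = max ch (h + 2 * p) := by
          rcases le_or_gt (h + 2 * p) ch with hle | hgt
          · simp [max_eq_left hle, not_lt.mpr hle]
          · simp [max_eq_right (le_of_lt hgt), hgt]
        rw [hmax]
        congr 1
        rw [shelfRow_append]
        simp [shelfRow]

-- ===== VERDICT (by name: the statement is the Claim_ definition above) =====
theorem shelf_pack_sizes_py_spec : Claim_equal_shelf_pack_sizes_py := by
  intro sizes W p _
  unfold Spec_shelf_pack_sizes_py shelf_pack_sizes_py shelf_pack_sizes_py_alt
  have := shelf_loop_eq W p sizes [] 0 [] (fun _ => rfl)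
  simp only [sumL, shelfPlace, shelfRow, List.append_nil] at this
  rw [this]
  cases shelfGroup W p sizes [] 0 0 [] <;> simp
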